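-- pv_equiv track=rewrite | github.com/qeedquan/challenges | uva/10254-the-priest-mathematician/10254-the-priest-mathematician.py | solvebf
-- ===== SOURCE A (Python) =====
-- def solvebf(n):
--     if n < 1:
--         return 0
--
--     p = [0] * (n + 1)
--     e = 1
--     c = 1
--     i = 1
--     while i <= n:
--         j = c
--         while i <= n and j > 0:
--             p[i] = p[i - 1] + e
--             i += 1
--             j -= 1
--         c += 1
--         e <<= 1
--     return p[n]
-- ===== SOURCE B (Python) =====
-- def solvebf(n):
--     # Closed form: values come in blocks, block m holds m copies of 2**(m-1);
--     # find the block containing index n, use sum_{k<m} k*2^(k-1) = (m-2)*2^(m-1)+1.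
--     if n < 1:
--         return 0
--     m = 1
--     while m * (m + 1) // 2 < n:
--         m += 1
--     full = (m - 2) * (1 << (m - 1)) + 1
--     rem = n - (m - 1) * m // 2
--     return full + rem * (1 << (m - 1))
-- ===== Notes on version B (the rewrite author's own statement) =====
-- stated objective: faster
-- what changed: Replaces the O(n) array-filling double loop with a closed form: locate the triangular block containing n by an O(sqrt n) scan and evaluate sum k*2^(k-1) = (m-2)*2^(m-1)+1 plus the partial block.
import Mathlib
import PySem

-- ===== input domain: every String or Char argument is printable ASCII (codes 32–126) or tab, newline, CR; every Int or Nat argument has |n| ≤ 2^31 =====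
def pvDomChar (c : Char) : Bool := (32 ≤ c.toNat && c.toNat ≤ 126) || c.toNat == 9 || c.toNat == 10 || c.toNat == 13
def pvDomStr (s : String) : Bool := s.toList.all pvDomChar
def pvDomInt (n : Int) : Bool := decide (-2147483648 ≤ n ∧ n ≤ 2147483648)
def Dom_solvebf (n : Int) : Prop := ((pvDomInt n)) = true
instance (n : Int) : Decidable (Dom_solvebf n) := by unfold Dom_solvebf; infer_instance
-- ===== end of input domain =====

-- B replaces A's O(n) array-filling double loop with a closed-form block sum found by an O(sqrt n) scan.


-- ===== PORT A =====
-- inner while loop: 'while i <= n and j > 0: p[i] = p[i-1] + e; i += 1; j -= 1'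
-- (indices are always in range 1..n in A's run, so List.set/getD are exact here)
def innerA (n : Int) (p : List Int) (e : Int) (i : Int) (j : Int) : List Int × Int :=
  if i ≤ n ∧ 0 < j then
    innerA n (p.set i.toNat (p.getD (i - 1).toNat 0 + e)) e (i + 1) (j - 1)
  else (p, i)
termination_by j.toNat
decreasing_by omega

-- outer while loop: 'while i <= n: <inner>; c += 1; e <<= 1'; fuel n+1 only makes the
-- recursion total — each outer iteration advances i by at least 1, so it never runs out
def outerA (fuel : Nat) (n : Int) (p : List Int) (e c i : Int) : List Int :=
  match fuel with
  | 0 => p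
  | fuel' + 1 =>
    if i ≤ n then
      outerA fuel' n (innerA n p e i c).1 (e * 2) (c + 1) (innerA n p e i c).2
    else p

def solvebf (n : Int) : Int :=
  if n < 1 then 0
  else
    let p := outerA (n.toNat + 1) n (List.replicate (n.toNat + 1) 0) 1 1 1
    p.getD n.toNat 0

-- ===== PORT B =====
-- 'while m * (m + 1) // 2 < n: m += 1'  (m*(m+1) ≥ 0, so Lean's ediv equals Python's //)
def findm (n m : Int) : Int :=
  if m * (m + 1) / 2 < n then findm n (m + 1) else m
termination_by (n - m).toNat
decreasing_by
  rename_i h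
  have h2 : 2 * (m * (m + 1) / 2) = m * (m + 1) :=
    Int.two_mul_ediv_two_of_even (Int.even_mul_succ_self m)
  have hmm : 0 ≤ m * (m - 1) := by
    by_cases hm : m ≤ 0
    · have h := mul_nonneg (by omega : (0:Int) ≤ -m) (by omega : (0:Int) ≤ -(m - 1))
      nlinarith
    · exact mul_nonneg (by omega) (by omega)
  have : m * (m + 1) = m * (m - 1) + 2 * m := by ring
  omega

def solvebf_alt (n : Int) : Int :=
  if n < 1 then 0
  else
    let m := findm n 1
    let full := (m - 2) * 2 ^ (m - 1).toNat + 1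
    let rem := n - (m - 1) * m / 2
    full + rem * 2 ^ (m - 1).toNat

-- ===== PRECONDITION & SPEC =====
def Spec_solvebf (n : Int) (out : Int) : Prop := out = solvebf_alt n
instance (n : Int) (out : Int) : Decidable (Spec_solvebf n out) := by unfold Spec_solvebf; infer_instance

-- ===== CLAIM (what is proved, stated in full; the proofs are below) =====
def Claim_equal_solvebf : Prop := ∀ (n : Int), Dom_solvebf n → Spec_solvebf n (solvebf n)

-- ===== LEMMAS AND PROOFS =====

-- triangular numbers, with division resolved
def T (c : Int) : Int := c * (c + 1) / 2

lemma T_double (c : Int) : 2 * T c = c * (c + 1) :=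
  Int.two_mul_ediv_two_of_even (Int.even_mul_succ_self c)

lemma T_succ (c : Int) : T c = T (c - 1) + c := by
  have h1 := T_double c
  have h2 := T_double (c - 1)
  have e1 : c * (c + 1) = (c - 1) * (c - 1 + 1) + 2 * c := by ring
  omega

def fullB (c : Int) : Int := (c - 2) * 2 ^ (c - 1).toNat + 1

lemma fullB_succ (c : Int) (hc : 1 ≤ c) :
    fullB (c + 1) = fullB c + c * 2 ^ (c - 1).toNat := by
  unfold fullB
  have h : (c + 1 - 1).toNat = (c - 1).toNat + 1 := by omega
  rw [h, pow_succ]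
  ring

lemma inner_spec_aux (n e : Int) : ∀ (k : Nat) (j : Int) (p : List Int) (i : Int),
    j.toNat = k → 0 ≤ j → 1 ≤ i → i ≤ n + 1 → (p.length : Int) = n + 1 →
    (innerA n p e i j).2 = min (n + 1) (i + j) ∧
    ((innerA n p e i j).1.length : Int) = n + 1 ∧
    (innerA n p e i j).1.getD ((min (n + 1) (i + j)) - 1).toNat 0
      = p.getD (i - 1).toNat 0 + (min (n + 1) (i + j) - i) * e := by
  intro k
  induction k with
  | zero =>
    intro j p i hk hj hi1 hi2 hlen
    have hj0 : j = 0 := by omega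
    subst hj0
    rw [innerA]
    simp only [if_neg (by omega : ¬ (i ≤ n ∧ (0:Int) < 0))]
    have hmin : min (n + 1) (i + 0) = i := by omega
    rw [hmin]
    refine ⟨rfl, hlen, by ring_nf⟩
  | succ k ih =>
    intro j p i hk hj hi1 hi2 hlen
    rw [innerA]
    by_cases hcond : i ≤ n ∧ 0 < j
    · rw [if_pos hcond]
      set p' := p.set i.toNat (p.getD (i - 1).toNat 0 + e) with hp'
      have hlen' : (p'.length : Int) = n + 1 := by
        rw [hp', List.length_set]; exact hlen
      obtain ⟨h1, h2, h3⟩ := ih (j - 1) p' (i + 1) (by omega) (by omega)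
        (by omega) (by omega) hlen'
      have hmin : min (n + 1) (i + 1 + (j - 1)) = min (n + 1) (i + j) := by omega
      rw [hmin] at h1 h3
      refine ⟨h1, h2, ?_⟩
      rw [h3]
      have hget : p'.getD (i + 1 - 1).toNat 0 = p.getD (i - 1).toNat 0 + e := by
        have hidx : (i + 1 - 1).toNat = i.toNat := by omega
        have hlt : i.toNat < p.length := by omega
        rw [hidx, hp', List.getD, List.getElem?_set_self hlt]
        rfl
      rw [hget]
      ring
    · rw [if_neg hcond]
      have hmin : min (n + 1) (i + j) = i := by omega
      rw [hmin]
      refine ⟨rfl, hlen, by ring_nf⟩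

lemma inner_spec (n e : Int) (j : Int) (p : List Int) (i : Int)
    (hj : 0 ≤ j) (hi1 : 1 ≤ i) (hi2 : i ≤ n + 1) (hlen : (p.length : Int) = n + 1) :
    (innerA n p e i j).2 = min (n + 1) (i + j) ∧
    ((innerA n p e i j).1.length : Int) = n + 1 ∧
    (innerA n p e i j).1.getD ((min (n + 1) (i + j)) - 1).toNat 0
      = p.getD (i - 1).toNat 0 + (min (n + 1) (i + j) - i) * e :=
  inner_spec_aux n e j.toNat j p i rfl hj hi1 hi2 hlen

lemma T_nonneg (c : Int) (hc : 0 ≤ c) : 0 ≤ T c := by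
  have h := T_double c
  have h2 : 0 ≤ c * (c + 1) := mul_nonneg hc (by omega)
  omega

lemma outerA_exit (fuel : Nat) (n : Int) (p : List Int) (e c i : Int) (h : n < i) :
    outerA fuel n p e c i = p := by
  cases fuel with
  | zero => rfl
  | succ fuel' => rw [outerA, if_neg (by omega)]

lemma outer_inv (n : Int) : ∀ (fuel : Nat) (p : List Int) (e c i : Int),
    1 ≤ c → e = 2 ^ (c - 1).toNat → i = T (c - 1) + 1 → i ≤ n →
    n + 1 ≤ i + fuel → (p.length : Int) = n + 1 →
    p.getD (i - 1).toNat 0 = fullB c →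
    (outerA fuel n p e c i).getD n.toNat 0
      = fullB (findm n c) + (n - T (findm n c - 1)) * 2 ^ (findm n c - 1).toNat := by
  intro fuel
  induction fuel with
  | zero =>
    intro p e c i hc he hi hin hfuel hlen hp
    exact absurd hin (by push_cast at hfuel; omega)
  | succ fuel' ih =>
    intro p e c i hc he hi hin hfuel hlen hp
    have hT : 0 ≤ T (c - 1) := T_nonneg (c - 1) (by omega)
    have hi1 : 1 ≤ i := by omega
    rw [outerA, if_pos hin]
    obtain ⟨h1, h2, h3⟩ := inner_spec n e c p i (by omega) hi1 (by omega) hlen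
    have hTs := T_succ c
    by_cases hcase : i + c ≤ n
    · -- the inner loop finished a whole block; continue with the invariant at block c+1
      have hmin : min (n + 1) (i + c) = i + c := by omega
      rw [hmin] at h1 h3
      rw [h1]
      have hg : (innerA n p e i c).1.getD (i + c - 1).toNat 0 = fullB (c + 1) := by
        rw [h3, hp, he, fullB_succ c hc]; ring
      have := ih (innerA n p e i c).1 (e * 2) (c + 1) (i + c) (by omega)
        (by rw [he]
            have hn : (c + 1 - 1).toNat = (c - 1).toNat + 1 := by omega
            rw [hn, pow_succ])
        (by rw [show c + 1 - 1 = c from by ring]; omega) (by omega) (by push_cast at hfuel ⊢; omega) h2 hg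
      rw [this]
      have hstep : findm n c = findm n (c + 1) := by
        rw [findm, if_pos]
        show c * (c + 1) / 2 < n
        have : c * (c + 1) / 2 = T c := rfl
        omega
      rw [hstep]
    · -- the block reaches past n: the next outer test fails and p[n] is already final
      have hmin : min (n + 1) (i + c) = n + 1 := by omega
      rw [hmin] at h1 h3
      rw [h1, outerA_exit fuel' n _ _ _ _ (by omega)]
      have hm : findm n c = c := by
        rw [findm, if_neg]
        show ¬ (c * (c + 1) / 2 < n)
        have : c * (c + 1) / 2 = T c := rfl
        omega
      rw [hm]
      have hn1 : (n + 1 - 1).toNat = n.toNat := by omega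
      rw [hn1] at h3
      rw [h3, hp, he]
      have : n + 1 - i = n - T (c - 1) := by omega
      rw [this]

theorem solvebf_spec : Claim_equal_solvebf := by
  intro n _
  unfold Spec_solvebf
  by_cases hn : n < 1
  · rw [solvebf, if_pos hn, solvebf_alt, if_pos hn]
  · rw [solvebf, if_neg hn, solvebf_alt, if_neg hn]
    have hres := outer_inv n (n.toNat + 1) (List.replicate (n.toNat + 1) 0) 1 1 1
      (by omega) (by norm_num) (by norm_num [T]) (by omega)
      (by push_cast; omega) (by simp; omega)
      (by simp [List.getD, fullB])
    rw [hres]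
    have hrw : (findm n 1 - 1) * (findm n 1 - 1 + 1) = (findm n 1 - 1) * findm n 1 := by ring
    simp only [T, fullB, hrw]
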